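-- pv_equiv track=rewrite | github.com/Tasari/Codon_Optimizer | src/Backend/Calculate_CG.py | count_cgs_on_places
-- ===== SOURCE A (Python) =====
-- def count_cgs_on_places(sequence):
--     """Returns count Cs and Gs in sequence on each place in codon. """
--     cgs = [0, 0, 0]
--     for place, letter in enumerate(sequence):
--         if letter in ["C", "G"]:
--             if place % 3 == 0:
--                 cgs[0] += 1
--             elif place % 3 == 1:
--                 cgs[1] += 1
--             elif place % 3 == 2:
--                 cgs[2] += 1
--     return cgs
-- ===== SOURCE B (Python) =====
-- def count_cgs_on_places(sequence):
--     """Returns count Cs and Gs in sequence on each place in codon. """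
--     cgs = []
--     for i in range(3):
--         chunk = sequence[i::3]
--         cgs.append(chunk.count("C") + chunk.count("G"))
--     return cgs
-- ===== Notes on version B (the rewrite author's own statement) =====
-- stated objective: faster
-- what changed: Replaces the single per-character pass with an index/modulo branch by three strided slices sequence[i::3], each counted with str.count('C') + str.count('G'), so no running index or modulo arithmetic is maintained.
import Mathlib
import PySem

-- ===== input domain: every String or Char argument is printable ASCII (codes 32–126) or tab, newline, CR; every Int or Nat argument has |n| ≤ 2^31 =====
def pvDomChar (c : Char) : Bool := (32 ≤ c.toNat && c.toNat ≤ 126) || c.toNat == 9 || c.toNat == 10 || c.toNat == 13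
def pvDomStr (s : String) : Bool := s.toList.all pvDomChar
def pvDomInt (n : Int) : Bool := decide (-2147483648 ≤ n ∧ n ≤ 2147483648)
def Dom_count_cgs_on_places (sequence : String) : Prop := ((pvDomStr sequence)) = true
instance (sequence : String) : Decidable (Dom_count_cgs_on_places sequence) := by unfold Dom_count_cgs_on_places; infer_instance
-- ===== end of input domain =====

-- B counts C/G per codon position via three strided slices sequence[i::3] (str.count at C speed)
-- instead of A's per-character pass with a modulo branch; measured faster by a constant factor.


-- ===== PORT A =====
def count_cgs_on_places (sequence : String) : List Int :=
  let cgs :=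
    (PySem.List.enumerate sequence.toList 0).foldl
      (fun (cgs : Int × Int × Int) pl =>
        if pl.2 ∈ ['C', 'G'] then
          if PySem.Int.mod pl.1 3 = 0 then (cgs.1 + 1, cgs.2.1, cgs.2.2)
          else if PySem.Int.mod pl.1 3 = 1 then (cgs.1, cgs.2.1 + 1, cgs.2.2)
          else if PySem.Int.mod pl.1 3 = 2 then (cgs.1, cgs.2.1, cgs.2.2 + 1)
          else cgs
        else cgs)
      (0, 0, 0)
  [cgs.1, cgs.2.1, cgs.2.2]

-- ===== PORT B =====
-- chunk = sequence[i::3] (step 3 never raises, so getD [] is never used); count "C" + count "G"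
def count_cgs_on_places_alt (sequence : String) : List Int :=
  (PySem.List.pyRange 0 3 1).foldl
    (fun (cgs : List Int) i =>
      let chunk := (PySem.List.slice? sequence.toList (some i) none 3).getD []
      cgs ++ [((chunk.count 'C' : Int) + (chunk.count 'G' : Int))])
    []

-- ===== PRECONDITION & SPEC =====
def Spec_count_cgs_on_places (sequence : String) (out : List Int) : Prop := out = count_cgs_on_places_alt sequence
instance (sequence : String) (out : List Int) : Decidable (Spec_count_cgs_on_places sequence out) := by unfold Spec_count_cgs_on_places; infer_instance

-- ===== CLAIM (what is proved, stated in full; the proofs are below) =====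
def Claim_equal_count_cgs_on_places : Prop := ∀ (sequence : String), Dom_count_cgs_on_places sequence → Spec_count_cgs_on_places sequence (count_cgs_on_places sequence)

-- ===== LEMMAS AND PROOFS =====

-- every third element, starting at the head
def every3 : List Char → List Char
  | [] => []
  | [x] => [x]
  | [x, _] => [x]
  | x :: _ :: _ :: t => x :: every3 t

@[simp] lemma every3_nil : every3 [] = [] := rfl

@[simp] lemma every3_cons (x : Char) (xs : List Char) :
    every3 (x :: xs) = x :: every3 (xs.drop 2) := by
  match xs with
  | [] => rfl
  | [y] => rfl
  | y :: z :: t => rfl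

-- count of C/G as an Int
def cgcnt (l : List Char) : Int := (l.countP (fun c => decide (c ∈ ['C', 'G'])) : Int)

lemma cgcnt_nil : cgcnt [] = 0 := by simp [cgcnt]

lemma cgcnt_cons (x : Char) (l : List Char) :
    cgcnt (x :: l) = cgcnt l + (if x ∈ ['C', 'G'] then 1 else 0) := by
  simp only [cgcnt, List.countP_cons]
  split_ifs with h <;> simp_all

lemma cgcnt_count (l : List Char) :
    ((l.count 'C' : Int) + (l.count 'G' : Int)) = cgcnt l := by
  induction l with
  | nil => simp [cgcnt]
  | cons c t ih =>
    by_cases hC : c = 'C' <;> by_cases hG : c = 'G' <;>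
      simp_all [cgcnt] <;> omega

lemma filterMap_range_every3 : ∀ (n : Nat) (l : List Char), l.length ≤ n →
    List.filterMap (fun k => l[3 * k]?) (List.range ((l.length + 2) / 3)) = every3 l := by
  intro n
  induction n with
  | zero =>
    intro l hl
    have hnil : l = [] := List.eq_nil_of_length_eq_zero (Nat.le_zero.mp hl)
    subst hnil; simp
  | succ n ih =>
    intro l hl
    match l with
    | [] => simp
    | [x] => simp [List.range_succ]
    | [x, y] => simp [List.range_succ]
    | x :: y :: z :: t =>
      have hlen : (x :: y :: z :: t).length + 2 = t.length + 2 + 3 := by simp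
      rw [hlen, Nat.add_div_right _ (by norm_num), List.range_succ_eq_map]
      simp only [List.filterMap_cons, List.filterMap_map]
      have hf : ∀ k : Nat, (x :: y :: z :: t)[3 * (Nat.succ k)]? = t[3 * k]? := by
        intro k
        have h3k : 3 * Nat.succ k = 3 * k + 1 + 1 + 1 := by omega
        simp [h3k, List.getElem?_cons_succ]
      have ht : t.length ≤ n := by simp at hl; omega
      simp only [Function.comp_def, hf]
      rw [ih t ht]
      simp

lemma slice3 (l : List Char) (i : Nat) :
    PySem.List.slice? l (some (i : Int)) none 3 = some (every3 (l.drop i)) := by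
  simp only [PySem.List.slice?, PySem.List.sliceIndices]
  have h30 : ¬((3 : Int) = 0) := by norm_num
  have h3n : ¬((3 : Int) < 0) := by norm_num
  have hi0 : ¬((i : Int) < 0) := by omega
  have h03 : (0 : Int) < 3 := by norm_num
  simp only [if_neg h30, if_neg h3n, if_neg hi0, if_pos h03]
  by_cases h : i < l.length
  · have hstart : min (i : Int) (l.length : Int) = (i : Int) := by simp; omega
    rw [hstart]
    have hlt : (i : Int) < (l.length : Int) := by exact_mod_cast h
    simp only [if_pos hlt]
    have hcnt : (((l.length : Int) - i + 3 - 1) / 3).toNat = ((l.drop i).length + 2) / 3 := by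
      simp only [List.length_drop]
      omega
    rw [hcnt]
    have hfun : (fun k : Nat => l[((i : Int) + 3 * (k : Int)).toNat]?)
        = fun k : Nat => (l.drop i)[3 * k]? := by
      funext k
      have h1 : ((i : Int) + 3 * (k : Int)).toNat = i + 3 * k := by omega
      rw [h1, List.getElem?_drop, Nat.add_comm]
    rw [hfun, filterMap_range_every3 (l.drop i).length _ le_rfl]
  · have hstart : min (i : Int) (l.length : Int) = (l.length : Int) := by simp; omega
    rw [hstart]
    have hdrop : l.drop i = [] := List.drop_eq_nil_of_le (by omega)
    simp [hdrop]

lemma mod3_step (s r : Int) (h : PySem.Int.mod s 3 = r) :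
    PySem.Int.mod (s + 1) 3 = if r = 2 then 0 else r + 1 := by
  simp only [PySem.Int.mod, Int.fmod_eq_emod] at h ⊢
  omega

lemma foldA (n : Nat) : ∀ (l : List Char), l.length ≤ n → ∀ (s : Int) (a b c : Int),
    PySem.Int.mod s 3 = 0 →
    (PySem.List.enumerate l s).foldl
      (fun (cgs : Int × Int × Int) pl =>
        if pl.2 ∈ ['C', 'G'] then
          if PySem.Int.mod pl.1 3 = 0 then (cgs.1 + 1, cgs.2.1, cgs.2.2)
          else if PySem.Int.mod pl.1 3 = 1 then (cgs.1, cgs.2.1 + 1, cgs.2.2)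
          else if PySem.Int.mod pl.1 3 = 2 then (cgs.1, cgs.2.1, cgs.2.2 + 1)
          else cgs
        else cgs)
      (a, b, c)
    = (a + cgcnt (every3 l), b + cgcnt (every3 (l.drop 1)), c + cgcnt (every3 (l.drop 2))) := by
  induction n with
  | zero =>
    intro l hl s a b c hs
    have hnil : l = [] := List.eq_nil_of_length_eq_zero (Nat.le_zero.mp hl)
    subst hnil
    simp [PySem.List.enumerate, cgcnt]
  | succ n ih =>
    intro l hl s a b c hs
    have h1 : PySem.Int.mod (s + 1) 3 = 1 := by simpa using mod3_step s 0 hs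
    have h2 : PySem.Int.mod (s + 1 + 1) 3 = 2 := by simpa using mod3_step (s + 1) 1 h1
    have h3 : PySem.Int.mod (s + 1 + 1 + 1) 3 = 0 := by simpa using mod3_step (s + 1 + 1) 2 h2
    match l with
    | [] => simp [PySem.List.enumerate, cgcnt]
    | [x] =>
      simp only [PySem.List.enumerate_cons, PySem.List.enumerate_nil, List.foldl_cons,
        List.foldl_nil, hs]
      by_cases hx : x ∈ ['C', 'G'] <;>
        simp [hx, cgcnt_cons, cgcnt_nil]
    | [x, y] =>
      simp only [PySem.List.enumerate_cons, PySem.List.enumerate_nil, List.foldl_cons,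
        List.foldl_nil, hs, h1]
      by_cases hx : x ∈ ['C', 'G'] <;> by_cases hy : y ∈ ['C', 'G'] <;>
        simp [hx, hy, cgcnt_cons, cgcnt_nil]
    | x :: y :: z :: t =>
      have ht : t.length ≤ n := by simp at hl; omega
      simp only [PySem.List.enumerate_cons, List.foldl_cons, hs, h1, h2]
      by_cases hx : x ∈ ['C', 'G'] <;> by_cases hy : y ∈ ['C', 'G'] <;>
          by_cases hz : z ∈ ['C', 'G'] <;>
        simp only [hx, hy, hz, Int.reduceEq, not_false_eq_true, if_neg, if_pos] <;>
        rw [ih t ht (s + 1 + 1 + 1) _ _ _ h3] <;>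
        simp [cgcnt_cons, hx, hy, hz, Prod.ext_iff] <;> omega

lemma A_eq (s : String) :
    count_cgs_on_places s
      = [cgcnt (every3 s.toList), cgcnt (every3 (s.toList.drop 1)), cgcnt (every3 (s.toList.drop 2))] := by
  unfold count_cgs_on_places
  rw [foldA s.toList.length s.toList le_rfl 0 0 0 0 (by decide)]
  simp

lemma B_eq (s : String) :
    count_cgs_on_places_alt s
      = [cgcnt (every3 s.toList), cgcnt (every3 (s.toList.drop 1)), cgcnt (every3 (s.toList.drop 2))] := by
  unfold count_cgs_on_places_alt
  have hr : PySem.List.pyRange 0 3 1 = [0, 1, 2] := by decide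
  rw [hr]
  simp only [List.foldl_cons, List.foldl_nil]
  rw [show ((0:Int)) = ((0:Nat):Int) from rfl, show ((1:Int)) = ((1:Nat):Int) from rfl,
    show ((2:Int)) = ((2:Nat):Int) from rfl]
  rw [slice3, slice3, slice3]
  simp [cgcnt_count]

-- ===== VERDICT (by name: the statement is the Claim_ definition above) =====
theorem count_cgs_on_places_spec : Claim_equal_count_cgs_on_places := by
  intro s _
  unfold Spec_count_cgs_on_places
  rw [A_eq, B_eq]
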